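-- pv_equiv track=rewrite | github.com/xonmin/Algorithm | pythonProject/Chai/Q2.py | findBeforeMatrix
-- ===== SOURCE A (Python) =====
-- def findBeforeMatrix(after):
--     N = 0
--     for i in after:
--         N += 1
--     M = len(after[0])
--     before = [[0] * M for i in range(N)]
--
--     before[0][0] = after[0][0]
--
--     dp = [[0] * M for i in range(N)]
--
--     dp[0][0] = after[0][0]
--     for i in range(N):
--         for j in range(M):
--             if i == 0 and j == 0:
--                 continue
--             if j == 0:
--                 dp[i][j] = after[i][j] - after[i - 1][j]
--             elif i == 0:
--                 dp[i][j] = after[i][j] - after[i][j - 1]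
--             else:
--                 dp[i][j] = after[i][j] - after[i - 1][j] - after[i][j - 1] + after[i - 1][j - 1]
--
--     return dp
-- ===== SOURCE B (Python) =====
-- def findBeforeMatrix(after):
--     M = len(after[0])
--     # pass 1: horizontal differences within each row
--     h = [[row[0]] + [row[j] - row[j - 1] for j in range(1, M)] for row in after]
--     # pass 2: vertical differences between consecutive h-rows
--     d = [h[0]]
--     for i in range(1, len(after)):
--         d.append([h[i][j] - h[i - 1][j] for j in range(M)])
--     return d
-- ===== Notes on version B (the rewrite author's own statement) =====
-- stated objective: alternative
-- what changed: B inverts the 2D prefix sum by two successive 1D difference passes (first along rows, then along columns of the intermediate matrix) instead of A's single inclusion-exclusion sweep that branch-cases on borders while writing into a preallocated zero matrix.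
import Mathlib
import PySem

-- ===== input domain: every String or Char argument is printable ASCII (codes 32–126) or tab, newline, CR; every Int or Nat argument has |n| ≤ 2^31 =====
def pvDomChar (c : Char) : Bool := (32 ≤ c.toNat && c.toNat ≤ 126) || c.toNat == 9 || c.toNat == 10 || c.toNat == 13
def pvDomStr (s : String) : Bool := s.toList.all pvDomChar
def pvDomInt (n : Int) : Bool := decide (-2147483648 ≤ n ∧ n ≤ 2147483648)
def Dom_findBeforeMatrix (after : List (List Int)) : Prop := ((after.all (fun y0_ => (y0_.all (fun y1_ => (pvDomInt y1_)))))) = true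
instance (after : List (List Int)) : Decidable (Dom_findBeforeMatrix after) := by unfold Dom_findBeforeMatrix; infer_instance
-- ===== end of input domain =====

-- B computes the difference matrix as two successive 1D difference passes (rows, then columns)
-- instead of A's single inclusion-exclusion sweep over a preallocated matrix; alternative, same cost.

-- ===== PORT A =====
-- after[i][j] read; indices produced by A's loops are nonnegative and in range on Pre_, where pyGetD is exact
def pvGetA (after : List (List Int)) (i j : Int) : Int :=
  PySem.List.pyGetD (PySem.List.pyGetD after i []) j 0

-- m[i][j] = v ; A only writes at nonnegative in-range indices, where .toNat/.set is exact
def pvSetA (m : List (List Int)) (i j : Int) (v : Int) : List (List Int) :=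
  m.set i.toNat ((PySem.List.pyGetD m i []).set j.toNat v)

def findBeforeMatrix (after : List (List Int)) : List (List Int) :=
  let N : Int := after.foldl (fun n _ => n + 1) 0
  let M : Int := ((PySem.List.pyGetD after 0 []).length : Int)
  let before := (PySem.List.pyRange 0 N 1).map (fun _ => List.replicate M.toNat (0 : Int))
  let _before := pvSetA before 0 0 (pvGetA after 0 0)
  let dp := (PySem.List.pyRange 0 N 1).map (fun _ => List.replicate M.toNat (0 : Int))
  let dp := pvSetA dp 0 0 (pvGetA after 0 0)
  (PySem.List.pyRange 0 N 1).foldl (fun dp i =>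
    (PySem.List.pyRange 0 M 1).foldl (fun dp j =>
      if i = 0 ∧ j = 0 then dp
      else if j = 0 then pvSetA dp i j (pvGetA after i j - pvGetA after (i-1) j)
      else if i = 0 then pvSetA dp i j (pvGetA after i j - pvGetA after i (j-1))
      else pvSetA dp i j (pvGetA after i j - pvGetA after (i-1) j
                          - pvGetA after i (j-1) + pvGetA after (i-1) (j-1))) dp) dp

-- ===== PORT B =====
-- row[j] read; B only reads nonnegative in-range indices on Pre_, where pyGetD is exact
def pvAt (row : List Int) (j : Int) : Int := PySem.List.pyGetD row j 0

def pvRowAt (m : List (List Int)) (i : Int) : List Int := PySem.List.pyGetD m i []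

def findBeforeMatrix_alt (after : List (List Int)) : List (List Int) :=
  let M : Int := ((pvRowAt after 0).length : Int)
  let h := after.map (fun row =>
    pvAt row 0 :: (PySem.List.pyRange 1 M 1).map (fun j => pvAt row j - pvAt row (j-1)))
  (PySem.List.pyRange 1 (after.length : Int) 1).foldl (fun d i =>
    d ++ [(PySem.List.pyRange 0 M 1).map (fun j => pvAt (pvRowAt h i) j - pvAt (pvRowAt h (i-1)) j)])
    [pvRowAt h 0]

-- ===== PRECONDITION & SPEC =====
-- Pre_ = exactly the inputs on which the Python A returns (no IndexError): a nonempty matrix whose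
-- first row is nonempty and whose every row has at least len(after[0]) entries.
def Pre_findBeforeMatrix (after : List (List Int)) : Prop :=
  after ≠ [] ∧ 0 < (after.headD []).length ∧ ∀ row ∈ after, (after.headD []).length ≤ row.length
instance (after : List (List Int)) : Decidable (Pre_findBeforeMatrix after) := by
  unfold Pre_findBeforeMatrix; infer_instance

def pvWitness_findBeforeMatrix : List (List Int) := [[1, 2], [3, 4]]

def Spec_findBeforeMatrix (after : List (List Int)) (out : List (List Int)) : Prop := out = findBeforeMatrix_alt after
instance (after : List (List Int)) (out : List (List Int)) : Decidable (Spec_findBeforeMatrix after out) := by unfold Spec_findBeforeMatrix; infer_instance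

-- ===== CLAIM (what is proved, stated in full; the proofs are below) =====
def Claim_equal_findBeforeMatrix : Prop := ∀ (after : List (List Int)), Dom_findBeforeMatrix after → Pre_findBeforeMatrix after → Spec_findBeforeMatrix after (findBeforeMatrix after)

-- ===== LEMMAS AND PROOFS =====

def wA (a : List (List Int)) (i j : Int) : Int :=
  if j = 0 then pvGetA a i j - pvGetA a (i-1) j
  else if i = 0 then pvGetA a i j - pvGetA a i (j-1)
  else pvGetA a i j - pvGetA a (i-1) j - pvGetA a i (j-1) + pvGetA a (i-1) (j-1)

def rowStep (a : List (List Int)) (i : Int) (r : List Int) (j : Int) : List Int :=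
  if i = 0 ∧ j = 0 then r else r.set j.toNat (wA a i j)

def innerBody (a : List (List Int)) (i : Int) (dp : List (List Int)) (j : Int) : List (List Int) :=
  if i = 0 ∧ j = 0 then dp
  else if j = 0 then pvSetA dp i j (pvGetA a i j - pvGetA a (i-1) j)
  else if i = 0 then pvSetA dp i j (pvGetA a i j - pvGetA a i (j-1))
  else pvSetA dp i j (pvGetA a i j - pvGetA a (i-1) j
                      - pvGetA a i (j-1) + pvGetA a (i-1) (j-1))

lemma A_unfold (a : List (List Int)) : findBeforeMatrix a =
    (PySem.List.pyRange 0 (a.foldl (fun n _ => n + 1) 0) 1).foldl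
      (fun dp i => (PySem.List.pyRange 0 (((PySem.List.pyGetD a 0 []).length : Int)) 1).foldl (innerBody a i) dp)
      (pvSetA ((PySem.List.pyRange 0 (a.foldl (fun n _ => n + 1) 0) 1).map
          (fun _ => List.replicate ((PySem.List.pyGetD a 0 []).length : Int).toNat (0:Int))) 0 0 (pvGetA a 0 0)) := rfl

lemma rowfold_length (a : List (List Int)) (i : Int) :
    ∀ (js : List Int) (r : List Int), (js.foldl (rowStep a i) r).length = r.length := by
  intro js
  induction js with
  | nil => intro r; rfl
  | cons j js ih =>
    intro r
    simp only [List.foldl_cons, ih, rowStep]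
    split_ifs <;> simp

lemma inner_length (a : List (List Int)) (i : Int) :
    ∀ (js : List Int) (dp : List (List Int)), (js.foldl (innerBody a i) dp).length = dp.length := by
  intro js
  induction js with
  | nil => intro dp; rfl
  | cons j js ih =>
    intro dp
    simp only [List.foldl_cons, ih, innerBody, pvSetA]
    split_ifs <;> simp

lemma innerBody_merge (a : List (List Int)) (i : Int) (dp : List (List Int)) (j : Int)
    (h : ¬ (i = 0 ∧ j = 0)) : innerBody a i dp j = pvSetA dp i j (wA a i j) := by
  unfold innerBody wA
  split_ifs <;> tauto

lemma innerA (a : List (List Int)) (i : Int) (hi : 0 ≤ i) :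
    ∀ (js : List Int) (dp : List (List Int)), i.toNat < dp.length →
    js.foldl (innerBody a i) dp = dp.set i.toNat (js.foldl (rowStep a i) ((dp[i.toNat]?).getD [])) := by
  intro js
  induction js with
  | nil =>
    intro dp hlt
    simp [List.getElem?_eq_getElem hlt, List.set_getElem_self]
  | cons j js ih =>
    intro dp hlt
    simp only [List.foldl_cons]
    by_cases hc : i = 0 ∧ j = 0
    · rw [show innerBody a i dp j = dp by simp [innerBody, hc], ih dp hlt,
        show rowStep a i ((dp[i.toNat]?).getD []) j = (dp[i.toNat]?).getD [] by simp [rowStep, hc]]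
    · rw [innerBody_merge a i dp j hc]
      have hrow : PySem.List.pyGetD dp i [] = dp[i.toNat] := by
        exact PySem.List.pyGetD_eq_getElem _ _ hi (by omega)
      have hset : pvSetA dp i j (wA a i j) = dp.set i.toNat (dp[i.toNat].set j.toNat (wA a i j)) := by
        simp [pvSetA, hrow]
      rw [hset, ih _ (by simpa using hlt)]
      rw [List.set_set]
      congr 1
      rw [show ((dp.set i.toNat (dp[i.toNat].set j.toNat (wA a i j)))[i.toNat]?).getD []
            = dp[i.toNat].set j.toNat (wA a i j) by
        simp [hlt]]
      rw [show rowStep a i ((dp[i.toNat]?).getD []) j = dp[i.toNat].set j.toNat (wA a i j) by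
        simp [rowStep, hc, List.getElem?_eq_getElem hlt]]

lemma innerA_oob (a : List (List Int)) (i : Int) :
    ∀ (js : List Int) (dp : List (List Int)), dp.length ≤ i.toNat →
    js.foldl (innerBody a i) dp = dp := by
  intro js
  induction js with
  | nil => intro dp _; rfl
  | cons j js ih =>
    intro dp hle
    simp only [List.foldl_cons]
    have hb : innerBody a i dp j = dp := by
      unfold innerBody pvSetA
      split_ifs <;> simp [List.set_eq_of_length_le hle]
    rw [hb, ih dp hle]

lemma rowfold_get (a : List (List Int)) (i : Int) :
    ∀ (m : ℕ) (r : List Int) (k : ℕ),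
    ((PySem.List.pyRange 0 (m:Int) 1).foldl (rowStep a i) r)[k]?
    = if k < m ∧ k < r.length ∧ ¬(i = 0 ∧ k = 0) then some (wA a i (k:Int)) else r[k]? := by
  intro m
  induction m with
  | zero =>
    intro r k
    rw [PySem.List.pyRange_one_eq_nil (by norm_num)]
    simp
  | succ m ih =>
    intro r k
    have hcast : ((m+1 : ℕ) : Int) = (m : Int) + 1 := by push_cast; ring
    rw [hcast, PySem.List.pyRange_one_succ_right (by positivity), List.foldl_append]
    simp only [List.foldl_cons, List.foldl_nil]
    have hlen := rowfold_length a i (PySem.List.pyRange 0 (m:Int) 1) r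
    by_cases hc : i = 0 ∧ (m : Int) = 0
    · have hm0 : m = 0 := by omega
      rw [show rowStep a i ((PySem.List.pyRange 0 (m:Int) 1).foldl (rowStep a i) r) (m:Int)
            = (PySem.List.pyRange 0 (m:Int) 1).foldl (rowStep a i) r by simp only [rowStep, if_pos hc]]
      rw [ih r k]
      subst hm0
      have : i = 0 := hc.1
      split_ifs <;> simp_all <;> omega
    · rw [show rowStep a i ((PySem.List.pyRange 0 (m:Int) 1).foldl (rowStep a i) r) (m:Int)
            = ((PySem.List.pyRange 0 (m:Int) 1).foldl (rowStep a i) r).set m (wA a i (m:Int)) by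
          simp only [rowStep, if_neg hc, Int.toNat_natCast]]
      rw [List.getElem?_set, hlen, ih r k]
      by_cases hkm : m = k
      · subst hkm
        have hnz : ¬ (i = 0 ∧ m = 0) := by
          intro ⟨h1, h2⟩; exact hc ⟨h1, by exact_mod_cast h2⟩
        by_cases hr : m < r.length
        · simp [hr, hnz]
        · simp [hr]
      · split_ifs <;> simp_all <;> omega

lemma outer_length (a : List (List Int)) (m : Int) :
    ∀ (is : List Int) (dp : List (List Int)),
    (is.foldl (fun dp i => (PySem.List.pyRange 0 m 1).foldl (innerBody a i) dp) dp).length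
      = dp.length := by
  intro is
  induction is with
  | nil => intro dp; rfl
  | cons i is ih =>
    intro dp
    rw [List.foldl_cons, ih, inner_length]

lemma outer_get (a : List (List Int)) (m : ℕ) :
    ∀ (n : ℕ) (dp : List (List Int)) (i : ℕ),
    ((PySem.List.pyRange 0 (n:Int) 1).foldl
        (fun dp ii => (PySem.List.pyRange 0 (m:Int) 1).foldl (innerBody a ii) dp) dp)[i]?
    = if i < n ∧ i < dp.length then
        some ((PySem.List.pyRange 0 (m:Int) 1).foldl (rowStep a (i:Int)) ((dp[i]?).getD []))
      else dp[i]? := by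
  intro n
  induction n with
  | zero =>
    intro dp i
    rw [show ((0:ℕ):Int) = 0 from rfl, PySem.List.pyRange_one_eq_nil (a:=0) le_rfl]
    simp
  | succ n ih =>
    intro dp i
    have hcast : ((n+1 : ℕ) : Int) = (n : Int) + 1 := by push_cast; ring
    rw [hcast, PySem.List.pyRange_one_succ_right (a:=0) (by positivity), List.foldl_append]
    simp only [List.foldl_cons, List.foldl_nil]
    have hlen := outer_length a (m:Int) (PySem.List.pyRange 0 (n:Int) 1) dp
    set dpn := (PySem.List.pyRange 0 (n:Int) 1).foldl
        (fun dp ii => (PySem.List.pyRange 0 (m:Int) 1).foldl (innerBody a ii) dp) dp with hdpn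
    by_cases hn : n < dp.length
    · rw [innerA a (n:Int) (by positivity) _ dpn (by simpa [hlen] using hn)]
      have hdpn_n : dpn[(n:Int).toNat]? = dp[n]? := by
        rw [Int.toNat_natCast, ih dp n]
        simp
      rw [hdpn_n]
      rw [Int.toNat_natCast]
      rw [List.getElem?_set, hlen]
      by_cases hni : n = i
      · subst hni
        simp [hn]
      · rw [if_neg (by omega), ih dp i]
        split_ifs <;> first | rfl | omega
    · rw [innerA_oob a (n:Int) _ dpn (by simp [hlen]; omega)]
      rw [ih dp i]
      split_ifs <;> first | rfl | omega

def hrowf (m : ℕ) (row : List Int) : List Int :=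
  pvAt row 0 :: (PySem.List.pyRange 1 (m:Int) 1).map (fun j => pvAt row j - pvAt row (j-1))

lemma B_unfold (a : List (List Int)) (m : ℕ) (hm : ((pvRowAt a 0).length : Int) = (m:Int)) :
    findBeforeMatrix_alt a
    = pvRowAt (a.map (hrowf m)) 0 ::
      (PySem.List.pyRange 1 (a.length : Int) 1).map (fun i =>
        (PySem.List.pyRange 0 (m:Int) 1).map (fun j =>
          pvAt (pvRowAt (a.map (hrowf m)) i) j - pvAt (pvRowAt (a.map (hrowf m)) (i-1)) j)) := by
  unfold findBeforeMatrix_alt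
  rw [hm]
  rw [PySem.List.foldl_append_singleton_eq_map]
  rfl

lemma L_count (l : List (List Int)) : ∀ (c : Int), l.foldl (fun x _ => x + 1) c = c + l.length := by
  induction l with
  | nil => intro c; simp
  | cons x l ih => intro c; simp [ih]; ring

lemma L_mapconst (n : ℕ) (c : List Int) :
    (PySem.List.pyRange 0 (n:Int) 1).map (fun _ => c) = List.replicate n c := by
  rw [List.map_const']
  simp [PySem.List.length_pyRange_one]

lemma hrowf_len (m : ℕ) (hm : 0 < m) (row : List Int) : (hrowf m row).length = m := by
  simp [hrowf, PySem.List.length_pyRange_one]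
  omega

lemma hrowf_get (m : ℕ) (row : List Int) (k : ℕ) (hk : k < m) :
    (hrowf m row)[k]? = some (if k = 0 then pvAt row 0
      else pvAt row (k:Int) - pvAt row ((k:Int)-1)) := by
  unfold hrowf
  cases k with
  | zero => simp
  | succ k =>
    simp only [List.getElem?_cons_succ, List.getElem?_map]
    rw [PySem.List.getElem?_pyRange_one, if_pos (by omega)]
    simp only [Option.map_some]
    congr 1
    have h1 : (1 : Int) + (k:Int) = ((k+1 : ℕ) : Int) := by push_cast; ring
    rw [h1]
    simp

lemma main_eq (a : List (List Int))
    (hne : a ≠ []) (hm0 : 0 < (a.headD []).length)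
    (hrows : ∀ row ∈ a, (a.headD []).length ≤ row.length) :
    findBeforeMatrix a = findBeforeMatrix_alt a := by
  set n := a.length with hn
  set m := (a.headD []).length with hm
  have hn0 : 0 < n := List.length_pos_of_ne_nil hne
  have hhead : PySem.List.pyGetD a 0 [] = a.headD [] := by
    cases a with
    | nil => exact absurd rfl hne
    | cons x l => simp [PySem.List.pyGetD_zero_cons]
  have hrow0 : pvRowAt a 0 = a.headD [] := hhead
  have hM : ((PySem.List.pyGetD a 0 []).length : Int) = (m:Int) := by rw [hhead]
  have hN : a.foldl (fun x _ => x + 1) (0:Int) = (n:Int) := by rw [L_count]; omega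
  have hdp0 : pvSetA ((PySem.List.pyRange 0 (n:Int) 1).map
        (fun _ => List.replicate ((m:Int)).toNat (0:Int))) 0 0 (pvGetA a 0 0)
      = (List.replicate n (List.replicate m (0:Int))).set 0
          ((List.replicate m (0:Int)).set 0 (pvGetA a 0 0)) := by
    rw [show ((m:Int)).toNat = m by simp, L_mapconst]
    unfold pvSetA
    have hg : PySem.List.pyGetD (List.replicate n (List.replicate m (0:Int))) 0 []
        = List.replicate m (0:Int) := by
      rw [PySem.List.pyGetD_zero, List.getD_eq_getElem?_getD, List.getElem?_replicate]
      simp [hn0]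
    rw [hg]
    rfl
  set r0 : List Int := (List.replicate m (0:Int)).set 0 (pvGetA a 0 0) with hr0
  set dp0 : List (List Int) := (List.replicate n (List.replicate m (0:Int))).set 0 r0 with hdp0'
  have hdp0len : dp0.length = n := by simp [hdp0']
  have hdp0get : ∀ i : ℕ, i < n → (dp0[i]?).getD []
      = if i = 0 then r0 else List.replicate m 0 := by
    intro i hi
    rw [hdp0', List.getElem?_set]
    by_cases h0 : i = 0
    · subst h0
      rw [if_pos rfl, if_pos (by simpa using hn0), if_pos rfl]
      rfl
    · rw [if_neg (fun h => h0 h.symm), List.getElem?_replicate, if_pos hi, if_neg h0]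
      rfl
  have hMB : ((pvRowAt a 0).length : Int) = (m:Int) := by rw [hrow0]
  have hhget : ∀ i : ℕ, i < n → pvRowAt (a.map (hrowf m)) (i:Int)
      = hrowf m ((a[i]?).getD []) := by
    intro i hi
    show PySem.List.pyGetD (a.map (hrowf m)) (i:Int) [] = _
    rw [PySem.List.pyGetD_natCast]
    rw [List.getD_eq_getElem?_getD, List.getElem?_map, List.getElem?_eq_getElem hi]
    simp
  have hhget0 : pvRowAt (a.map (hrowf m)) 0 = hrowf m ((a[0]?).getD []) := by
    have := hhget 0 hn0
    simpa using this
  have hread : ∀ i : ℕ, i < n → ∀ k : Int, pvGetA a (i:Int) k = pvAt ((a[i]?).getD []) k := by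
    intro i hi k
    show PySem.List.pyGetD (PySem.List.pyGetD a (i:Int) []) k 0 = _
    rw [PySem.List.pyGetD_natCast, List.getD_eq_getElem?_getD, List.getElem?_eq_getElem hi]
    rfl
  have hread0 : ∀ k : Int, pvGetA a 0 k = pvAt ((a[0]?).getD []) k := by
    have := hread 0 hn0
    simpa using this
  have hrowlen : ∀ i : ℕ, i < n → ((dp0[i]?).getD []).length = m := by
    intro i hi
    rw [hdp0get i hi]
    split_ifs <;> simp [hr0]
  have hvat : ∀ (row : List Int) (k : ℕ), k < m → pvAt (hrowf m row) (k:Int)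
      = (if k = 0 then pvAt row 0 else pvAt row (k:Int) - pvAt row ((k:Int)-1)) := by
    intro row k hk
    show PySem.List.pyGetD (hrowf m row) (k:Int) 0 = _
    rw [PySem.List.pyGetD_natCast, List.getD_eq_getElem?_getD, hrowf_get m row k hk]
    rfl
  -- assemble
  rw [A_unfold a, hN, hM, hdp0, B_unfold a m hMB]
  apply List.ext_getElem?
  intro i
  rw [outer_get a m n _ i]
  by_cases hi : i < n
  · rw [if_pos ⟨hi, by rw [hdp0len]; exact hi⟩]
    cases i with
    | zero =>
      rw [List.getElem?_cons_zero, hhget0]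
      congr 1
      apply List.ext_getElem?
      intro k
      rw [show ((0:ℕ):Int) = 0 by simp, rowfold_get a 0 m _ k]
      rw [hrowlen 0 hn0]
      by_cases hk : k < m
      · cases k with
        | zero =>
          rw [if_neg (by simp)]
          rw [hdp0get 0 hn0, if_pos rfl, hr0]
          rw [List.getElem?_set, if_pos rfl, if_pos (by simpa using hm0)]
          rw [hrowf_get m _ 0 hm0]
          simp [hread0]
        | succ k =>
          have hc : ((k+1:ℕ):Int) ≠ 0 := by exact_mod_cast Nat.succ_ne_zero k
          rw [if_pos ⟨hk, hk, by simp⟩]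
          rw [hrowf_get m _ (k+1) hk]
          have hwa : wA a 0 ((k+1:ℕ):Int)
              = pvGetA a 0 ((k+1:ℕ):Int) - pvGetA a 0 (((k+1:ℕ):Int)-1) := by
            unfold wA; rw [if_neg hc, if_pos rfl]
          rw [hwa, hread0, hread0, if_neg (Nat.succ_ne_zero k)]
      · rw [if_neg (by omega)]
        rw [hdp0get 0 hn0, if_pos rfl, hr0]
        rw [List.getElem?_eq_none (by simpa using (by omega : m ≤ k))]
        rw [List.getElem?_eq_none (by rw [hrowf_len m hm0]; omega)]
    | succ i' =>
      rw [List.getElem?_cons_succ, List.getElem?_map,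
        PySem.List.getElem?_pyRange_one, if_pos (by omega)]
      simp only [Option.map_some]
      congr 1
      have hcast1 : (1:Int) + (i':Int) = ((i'+1:ℕ):Int) := by push_cast; ring
      have hcast2 : ((i'+1:ℕ):Int) - 1 = ((i':ℕ):Int) := by push_cast; ring
      rw [hcast1, hcast2, hhget (i'+1) hi, hhget i' (by omega)]
      apply List.ext_getElem?
      intro k
      rw [rowfold_get a ((i'+1:ℕ):Int) m _ k, hrowlen (i'+1) hi, List.getElem?_map,
        PySem.List.getElem?_pyRange_one]
      by_cases hk : k < m
      · rw [if_pos ⟨hk, hk, by push_cast; omega⟩, if_pos (by omega)]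
        simp only [Option.map_some, zero_add]
        rw [hvat _ k hk, hvat _ k hk]
        have hi1 : ((i'+1:ℕ):Int) ≠ 0 := by exact_mod_cast Nat.succ_ne_zero i'
        by_cases hk0 : k = 0
        · subst hk0
          have hwa : wA a ((i'+1:ℕ):Int) ((0:ℕ):Int)
              = pvGetA a ((i'+1:ℕ):Int) ((0:ℕ):Int)
                - pvGetA a (((i'+1:ℕ):Int)-1) ((0:ℕ):Int) := by
            unfold wA; rw [if_pos (by simp)]
          rw [hwa, hcast2, hread (i'+1) hi, hread i' (by omega)]
          simp
        · have hkc : ((k:ℕ):Int) ≠ 0 := by exact_mod_cast hk0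
          have hwa : wA a ((i'+1:ℕ):Int) ((k:ℕ):Int)
              = pvGetA a ((i'+1:ℕ):Int) ((k:ℕ):Int)
                - pvGetA a (((i'+1:ℕ):Int)-1) ((k:ℕ):Int)
                - pvGetA a ((i'+1:ℕ):Int) (((k:ℕ):Int)-1)
                + pvGetA a (((i'+1:ℕ):Int)-1) (((k:ℕ):Int)-1) := by
            unfold wA; rw [if_neg hkc, if_neg hi1]
          rw [hwa, hcast2]
          rw [hread (i'+1) hi, hread (i'+1) hi, hread i' (by omega), hread i' (by omega)]
          rw [if_neg hk0, if_neg hk0]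
          congr 1
          ring
      · rw [if_neg (by omega), if_neg (by omega)]
        rw [hdp0get (i'+1) hi, if_neg (Nat.succ_ne_zero i')]
        simp [List.getElem?_replicate]
        omega
  · rw [if_neg (by omega), hdp0']
    rw [List.getElem?_eq_none (by simp; omega)]
    rcases i with _ | i'
    · omega
    rw [List.getElem?_cons_succ, List.getElem?_map,
      PySem.List.getElem?_pyRange_one, if_neg (by omega)]
    rfl

-- ===== VERDICT (by name: the statement is the Claim_ definition above) =====
theorem findBeforeMatrix_spec : Claim_equal_findBeforeMatrix := by
  intro a _ hpre
  obtain ⟨hne, hm0, hrows⟩ := hpre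
  show findBeforeMatrix a = findBeforeMatrix_alt a
  exact main_eq a hne hm0 hrows
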